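-- pv_equiv track=rewrite | github.com/JamilProg/crosslingual_bert_annotation_projection | src/silver_standard_factory/__init__.py | remove_trailing_punctations
-- ===== SOURCE A (Python) =====
-- import string
--
-- def remove_trailing_punctations(txt):
--     count = 0
--     for char in reversed(txt):
--         if char in string.punctuation:
--             count += 1
--         else:
--             break
--     txt = txt.rstrip(string.punctuation)
--     return txt, count
-- ===== SOURCE B (Python) =====
-- import string
--
-- def remove_trailing_punctations(txt):
--     stripped = txt.rstrip(string.punctuation)
--     return stripped, len(txt) - len(stripped)
-- ===== Notes on version B (the rewrite author's own statement) =====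
-- stated objective: simpler
-- what changed: B drops A's explicit reversed character-counting loop and derives the count as len(txt) - len(rstripped txt), leaving a single library call plus length arithmetic.
import Mathlib
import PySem

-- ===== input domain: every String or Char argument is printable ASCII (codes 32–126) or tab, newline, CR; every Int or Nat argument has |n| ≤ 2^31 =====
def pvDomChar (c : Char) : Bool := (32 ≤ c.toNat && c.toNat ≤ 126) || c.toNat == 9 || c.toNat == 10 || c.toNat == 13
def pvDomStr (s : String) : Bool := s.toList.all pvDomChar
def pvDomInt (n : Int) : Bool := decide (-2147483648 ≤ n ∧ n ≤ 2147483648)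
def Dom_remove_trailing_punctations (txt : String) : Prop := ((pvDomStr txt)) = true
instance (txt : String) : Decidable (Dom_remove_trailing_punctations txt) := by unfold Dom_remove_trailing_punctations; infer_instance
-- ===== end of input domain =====

-- B replaces A's explicit reversed character-counting loop by length arithmetic on the rstrip result (objective: simpler).

-- string.punctuation (shared constant of both Pythons)
def pyPunctuation : List Char := "!\"#$%&'()*+,-./:;<=>?@[\\]^_`{|}~".toList

-- txt.rstrip(string.punctuation), by hand (PySem has no rstrip-with-chars): drop the
-- trailing run of punctuation characters; exact for Python's rstrip(chars) semantics.
def pyRstripPunct (txt : String) : String :=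
  String.ofList ((txt.toList.reverse.dropWhile (· ∈ pyPunctuation)).reverse)

-- ===== PORT A =====
-- the for-loop over reversed(txt) with break: count the leading punctuation run of the reversed list
def aCountLoop : List Char → Int
  | [] => 0
  | c :: cs => if c ∈ pyPunctuation then 1 + aCountLoop cs else 0

def remove_trailing_punctations (txt : String) : String × Int :=
  let count := aCountLoop txt.toList.reverse
  (pyRstripPunct txt, count)

-- ===== PORT B =====
def remove_trailing_punctations_alt (txt : String) : String × Int :=
  let stripped := pyRstripPunct txt
  (stripped, (txt.toList.length : Int) - (stripped.toList.length : Int))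

-- ===== PRECONDITION & SPEC =====
def Spec_remove_trailing_punctations (txt : String) (out : String × Int) : Prop := out = remove_trailing_punctations_alt txt
instance (txt : String) (out : String × Int) : Decidable (Spec_remove_trailing_punctations txt out) := by unfold Spec_remove_trailing_punctations; infer_instance

-- ===== CLAIM (what is proved, stated in full; the proofs are below) =====
def Claim_equal_remove_trailing_punctations : Prop := ∀ (txt : String), Dom_remove_trailing_punctations txt → Spec_remove_trailing_punctations txt (remove_trailing_punctations txt)

-- ===== LEMMAS AND PROOFS =====

-- A's break-loop counts exactly the chars dropWhile removes
theorem aCountLoop_eq (l : List Char) :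
    aCountLoop l = (l.length : Int) - ((l.dropWhile (· ∈ pyPunctuation)).length : Int) := by
  induction l with
  | nil => simp [aCountLoop]
  | cons c cs ih =>
    by_cases h : c ∈ pyPunctuation
    · simp [aCountLoop, h, ih]; ring
    · simp [aCountLoop, h]

-- ===== VERDICT (by name: the statement is the Claim_ definition above) =====
theorem remove_trailing_punctations_spec : Claim_equal_remove_trailing_punctations := by
  unfold Claim_equal_remove_trailing_punctations
  intro txt _
  unfold Spec_remove_trailing_punctations remove_trailing_punctations remove_trailing_punctations_alt
  simp only [pyRstripPunct, aCountLoop_eq]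
  simp
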